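/- GENERATED by tools/mkcompositions.py from design/units.gif.tsv (unit `GifAddExtensionBlock.COMPOSITION`) — do not edit.
   THE PROOF of the composition unit `GifAddExtensionBlock.COMPOSITION`: the 4 segments of `GifAddExtensionBlock` chain into its contract, by the theorem
   `Gif.Spec.GifAddExtensionBlock.compose` (proved next to the cut assertions). -/
import Gif.Spec.Units.GifAddExtensionBlock_COMPOSITION

/-- The segments of `GifAddExtensionBlock` compose into its contract. -/
theorem Gif.Spec.Proved.GifAddExtensionBlock_COMPOSITION_ok : Gif.Spec.GifAddExtensionBlock_COMPOSITION.Statement := by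
  intro Lay _hLay μ _hμ u₀ h_GifAddExtensionBlock_1 h_GifAddExtensionBlock_2 h_GifAddExtensionBlock_3 h_GifAddExtensionBlock_E
  apply Gif.Spec.GifAddExtensionBlock.compose
  all_goals assumption
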